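-- pv_equiv track=rewrite | github.com/tklee-yonsei/algorithms | lec10/03_regular_expression/regex.py | validate_pattern
-- ===== SOURCE A (Python) =====
-- def validate_pattern(pattern: str) -> bool:
--     """
--     패턴의 문법 오류 검사
--
--     Args:
--         pattern (str): 검사할 패턴
--
--     Returns:
--         bool: 유효하면 True, 아니면 False
--     """
--     if not pattern:
--         return True
--
--     for i, char in enumerate(pattern):
--         if char == '*':
--             # '*'가 맨 앞에 올 수 없음
--             if i == 0:
--                 return False
--             # '**' 패턴은 유효하지 않음
--             if i > 0 and pattern[i-1] == '*':
--                 return False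
--
--     return True
-- ===== SOURCE B (Python) =====
-- def validate_pattern(pattern: str) -> bool:
--     # Split on '*': the pattern is valid iff there is no '*' at all, or the
--     # segment before the first '*' is nonempty (no leading '*') and no segment
--     # strictly between two '*'s is empty (no '**').
--     parts = pattern.split('*')
--     if len(parts) == 1:
--         return True
--     return parts[0] != '' and '' not in parts[1:-1]
-- ===== Notes on version B (the rewrite author's own statement) =====
-- stated objective: alternative
-- what changed: Instead of A's per-character loop with index arithmetic and previous-character lookback, B splits the pattern on the star character and judges the resulting segment list: valid iff there is only one segment (no star at all), or the leading segment is nonempty (no leading star) and no segment strictly between two stars is empty (no doubled star).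
import Mathlib
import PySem

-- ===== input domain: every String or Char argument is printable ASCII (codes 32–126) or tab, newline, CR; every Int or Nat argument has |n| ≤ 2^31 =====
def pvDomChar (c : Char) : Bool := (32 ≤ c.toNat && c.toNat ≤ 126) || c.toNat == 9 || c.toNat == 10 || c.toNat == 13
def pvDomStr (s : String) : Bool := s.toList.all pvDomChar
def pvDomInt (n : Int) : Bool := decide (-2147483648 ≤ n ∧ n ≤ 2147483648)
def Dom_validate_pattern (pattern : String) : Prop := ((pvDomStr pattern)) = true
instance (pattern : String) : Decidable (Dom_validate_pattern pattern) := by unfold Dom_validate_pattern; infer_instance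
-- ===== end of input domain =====

-- B replaces A's per-character loop by splitting the pattern into the segments between '*'s
-- and judging those segments (objective: alternative decomposition, same O(n) cost).

-- ===== PORT A =====
-- literal port of A's enumerate loop with early returns; pattern[i-1] is PySem.Str.pyGet?
def validate_pattern.goA (pattern : String) : List (Int × Char) → Bool
  | [] => true
  | (i, c) :: rest =>
    if c == '*' then
      if i == 0 then false
      else if decide (i > 0) && (PySem.Str.pyGet? pattern (i - 1) == some '*') then false
      else validate_pattern.goA pattern rest
    else validate_pattern.goA pattern rest

def validate_pattern (pattern : String) : Bool :=
  if pattern.toList = [] then true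
  else validate_pattern.goA pattern (PySem.List.enumerate pattern.toList 0)

-- ===== PORT B =====
-- B: parts = pattern.split('*'); len(parts)==1 or (parts[0] != '' and '' not in parts[1:-1])
def validate_pattern_alt (pattern : String) : Bool :=
  let parts := PySem.Chars.splitOn pattern.toList "*".toList
  if parts.length == 1 then true
  else (PySem.List.pyGet? parts 0 != some []) &&
       !((PySem.List.slice parts (some 1) (some (-1))).contains [])

-- ===== PRECONDITION & SPEC =====
def Spec_validate_pattern (pattern : String) (out : Bool) : Prop := out = validate_pattern_alt pattern
instance (pattern : String) (out : Bool) : Decidable (Spec_validate_pattern pattern out) := by unfold Spec_validate_pattern; infer_instance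

-- ===== CLAIM (what is proved, stated in full; the proofs are below) =====
def Claim_equal_validate_pattern : Prop := ∀ (pattern : String), Dom_validate_pattern pattern → Spec_validate_pattern pattern (validate_pattern pattern)

-- ===== LEMMAS AND PROOFS =====

-- clean recursion computing splitOn … ['*'] (cur is the reversed current segment)
def msplit (cur : List Char) : List Char → List (List Char)
  | [] => [cur.reverse]
  | c :: r => if c = '*' then cur.reverse :: msplit [] r else msplit (c :: cur) r

theorem msplit_ne_nil (l cur : List Char) : msplit cur l ≠ [] := by
  induction l generalizing cur with
  | nil => simp [msplit]
  | cons c r ih => by_cases h : c = '*' <;> simp [msplit, h, ih]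

theorem splitOn_go_eq (fuel : Nat) : ∀ (l cur : List Char) (acc : List (List Char)),
    l.length < fuel →
    PySem.Chars.splitOn.go ['*'] fuel l cur acc = acc.reverse ++ msplit cur l := by
  induction fuel with
  | zero => intro l cur acc h; omega
  | succ fuel ih =>
    intro l cur acc h
    cases l with
    | nil => simp [PySem.Chars.splitOn.go, msplit]
    | cons c r =>
      by_cases hc : c = '*'
      · have hp : (['*'] : List Char).isPrefixOf (c :: r) = true := by simp [hc]
        rw [PySem.Chars.splitOn.go, if_pos hp]
        have hr : List.drop (['*'] : List Char).length (c :: r) = r := rfl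
        rw [hr, ih r [] (cur.reverse :: acc) (by simp at h; omega)]
        simp [msplit, hc]
      · have hp : (['*'] : List Char).isPrefixOf (c :: r) = false := by
          simp only [List.isPrefixOf, Bool.and_eq_false_iff, beq_eq_false_iff_ne, ne_eq]
          exact Or.inl fun h => hc h.symm
        rw [PySem.Chars.splitOn.go, if_neg (by simp [hp])]
        rw [ih r (c :: cur) acc (by simp at h; omega)]
        simp [msplit, hc]

theorem splitOn_eq_msplit (l : List Char) :
    PySem.Chars.splitOn l ['*'] = msplit [] l := by
  have := splitOn_go_eq (l.length + 1) l [] [] (by omega)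
  simpa [PySem.Chars.splitOn] using this

-- tail judges: hWk = previous char was not '*', hSt = previous char was '*'
mutual
def hWk : List Char → Bool
  | [] => true
  | c :: r => if c = '*' then hSt r else hWk r
def hSt : List Char → Bool
  | [] => true
  | c :: r => if c = '*' then false else hWk r
end

-- proof-side recursion mirroring A's loop: scanning t with previous character p
def go2 (p : Char) : List Char → Bool
  | [] => true
  | c :: r => if c == '*' && p == '*' then false else go2 c r

theorem go2_eq_h (t : List Char) : ∀ p : Char,
    go2 p t = if p = '*' then hSt t else hWk t := by
  induction t with
  | nil => intro p; by_cases hp : p = '*' <;> simp [go2, hWk, hSt, hp]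
  | cons c r ih =>
    intro p
    by_cases hp : p = '*' <;> by_cases hc : c = '*' <;>
      simp [go2, hWk, hSt, hp, hc, ih]

theorem goA_eq (pattern : String) (t : List Char) :
    ∀ (k : Nat) (p : Char), 1 ≤ k → pattern.toList.drop k = t →
      pattern.toList[k-1]? = some p →
      validate_pattern.goA pattern (PySem.List.enumerate t (k : Int)) = go2 p t := by
  induction t with
  | nil => intro k p _ _ _; simp [PySem.List.enumerate_nil, validate_pattern.goA, go2]
  | cons c r ih =>
    intro k p hk hdrop hprev
    have hcur : pattern.toList[k]? = some c := by
      rw [← List.head?_drop, hdrop]; rfl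
    have hdrop' : pattern.toList.drop (k + 1) = r := by
      rw [← List.drop_drop, hdrop]; rfl
    have hget : PySem.List.pyGet? pattern.toList ((k : Int) - 1) = some p := by
      have h : ((k : Int) - 1) = ((k - 1 : Nat) : Int) := by omega
      rw [h, PySem.List.pyGet?_natCast]; exact hprev
    have hrec : validate_pattern.goA pattern (PySem.List.enumerate r ((k : Int) + 1)) = go2 c r := by
      have := ih (k + 1) c (by omega) hdrop' (by simpa using hcur)
      simpa using this
    rw [PySem.List.enumerate_cons, validate_pattern.goA]
    by_cases hc : c = '*'
    · by_cases hp : p = '*'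
      · simp [hc, hp, hget, go2]
        intro h1 h2; exact absurd h2 h1
      · simp [hc, hp, hget, go2, hrec]
        intro _; omega
    · simp [hc, go2, hrec]

theorem msplit_no_star (l : List Char) : ∀ cur, '*' ∉ l → msplit cur l = [cur.reverse ++ l] := by
  induction l with
  | nil => intro cur _; simp [msplit]
  | cons c r ih =>
    intro cur h
    have hc : c ≠ '*' := fun hc => h (by simp [hc])
    rw [msplit, if_neg hc, ih (c :: cur) (fun hm => h (by simp [hm]))]
    simp

theorem msplit_len_two (l : List Char) : ∀ cur, '*' ∈ l → 2 ≤ (msplit cur l).length := by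
  induction l with
  | nil => intro cur h; simp at h
  | cons c r ih =>
    intro cur h
    by_cases hc : c = '*'
    · rw [msplit, if_pos hc]
      have := msplit_ne_nil r []
      simp only [List.length_cons]
      have : 1 ≤ (msplit [] r).length := List.length_pos_of_ne_nil (msplit_ne_nil r [])
      omega
    · rw [msplit, if_neg hc]
      have hr : '*' ∈ r := by
        rcases List.mem_cons.mp h with h | h
        · exact absurd h.symm hc
        · exact h
      exact ih (c :: cur) hr

theorem hWk_no_star (l : List Char) : '*' ∉ l → hWk l = true := by
  induction l with
  | nil => intro _; rfl
  | cons c r ih =>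
    intro h
    have hc : c ≠ '*' := fun hc => h (by simp [hc])
    rw [hWk, if_neg hc]; exact ih (fun hm => h (by simp [hm]))

theorem head_msplit (l : List Char) : ∀ cur, ∃ q qs, msplit cur l = (cur.reverse ++ q) :: qs := by
  induction l with
  | nil => intro cur; exact ⟨[], [], by simp [msplit]⟩
  | cons c r ih =>
    intro cur
    by_cases hc : c = '*'
    · exact ⟨[], msplit [] r, by simp [msplit, hc]⟩
    · obtain ⟨q, qs, hq⟩ := ih (c :: cur)
      exact ⟨c :: q, qs, by simp [msplit, hc, hq]⟩

theorem mem_dropLast_msplit (l : List Char) :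
    (∀ cur : List Char, cur ≠ [] → (([] ∈ (msplit cur l).dropLast) ↔ hWk l = false)) ∧
    (([] ∈ (msplit [] l).dropLast) ↔ hSt l = false) := by
  induction l with
  | nil =>
    refine ⟨?_, ?_⟩
    · intro cur _; simp [msplit, hWk]
    · simp [msplit, hSt]
  | cons c r ih =>
    constructor
    · intro cur hcur
      by_cases hc : c = '*'
      · rw [msplit, if_pos hc, List.dropLast_cons_of_ne_nil (msplit_ne_nil r []), hWk, if_pos hc]
        simp only [List.mem_cons]
        constructor
        · rintro (h | h)
          · exact absurd h.symm (by simpa using hcur)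
          · exact ih.2.mp h
        · intro h; exact Or.inr (ih.2.mpr h)
      · rw [msplit, if_neg hc, hWk, if_neg hc]
        exact ih.1 (c :: cur) (by simp)
    · by_cases hc : c = '*'
      · rw [msplit, if_pos hc, List.dropLast_cons_of_ne_nil (msplit_ne_nil r []), hSt, if_pos hc]
        simp
      · rw [msplit, if_neg hc, hSt, if_neg hc]
        exact ih.1 [c] (by simp)

theorem slice_one_negone {α : Type} (p0 : α) (ps : List α) :
    PySem.List.slice (p0 :: ps) (some 1) (some (-1)) = ps.dropLast := by
  simp [PySem.List.slice, PySem.List.clampIdx, List.dropLast_eq_take]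
  split_ifs with h
  · exact absurd h (by omega)
  · omega

-- B's port, rewritten through msplit
theorem alt_eq (pattern : String) :
    validate_pattern_alt pattern =
      (if (msplit [] pattern.toList).length = 1 then true
       else ((msplit [] pattern.toList).head?.getD [] != []) &&
            !decide ([] ∈ ((msplit [] pattern.toList).drop 1).dropLast)) := by
  unfold validate_pattern_alt
  rw [show ("*" : String).toList = ['*'] from rfl, splitOn_eq_msplit]
  rcases hms : msplit [] pattern.toList with _ | ⟨p0, ps⟩
  · exact absurd hms (msplit_ne_nil _ _)
  · by_cases hlen : (p0 :: ps).length = 1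
    · simp [hlen]
    · rw [if_neg (by simpa using hlen), if_neg hlen]
      rw [slice_one_negone]
      congr 1
      · simp only [PySem.List.pyGet?, PySem.List.pyIdx?]
        norm_num
        cases h : p0 == ([] : List Char) <;> simp [bne, h]
      · simp

-- ===== VERDICT (by name: the statement is the Claim_ definition above) =====
theorem validate_pattern_spec : Claim_equal_validate_pattern := by
  intro pattern _
  unfold Spec_validate_pattern
  rw [alt_eq, validate_pattern]
  rcases hs : pattern.toList with _ | ⟨c, r⟩
  · simp [msplit]
  · rw [if_neg (by simp : ¬(c :: r = ([] : List Char))), PySem.List.enumerate_cons]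
    by_cases hstar : '*' ∈ c :: r
    · have hlen2 := msplit_len_two (c :: r) [] hstar
      rw [if_neg (by omega)]
      by_cases hc : c = '*'
      · -- leading star: A returns false immediately; B sees an empty first segment
        subst hc
        have hms : msplit [] ('*' :: r) = [] :: msplit [] r := by simp [msplit]
        simp [validate_pattern.goA, hms]
      · -- first segment starts with c ≠ '*'
        obtain ⟨q, qs, hq⟩ := head_msplit r [c]
        have hms : msplit [] (c :: r) = (c :: q) :: qs := by simp [msplit, hc, hq]
        have hqs : qs ≠ [] := by
          intro h; rw [hms, h] at hlen2; simp at hlen2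
        have h0 : pattern.toList[0]? = some c := by rw [hs]; rfl
        have hd : pattern.toList.drop 1 = r := by rw [hs]; rfl
        have hA := goA_eq pattern r 1 c (by omega) hd (by simpa using h0)
        simp only [Nat.cast_one] at hA
        have hmem : ([] ∈ (msplit [c] r).dropLast) ↔ hWk r = false :=
          (mem_dropLast_msplit r).1 [c] (by simp)
        rw [hq, List.dropLast_cons_of_ne_nil hqs] at hmem
        simp only [List.mem_cons, List.reverse_singleton, List.singleton_append] at hmem
        have hmem' : ([] ∈ qs.dropLast) ↔ hWk r = false := by
          constructor
          · intro h; exact hmem.mp (Or.inr h)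
          · intro h
            rcases hmem.mpr h with h' | h'
            · exact absurd h'.symm (by simp)
            · exact h'
        have hgo : validate_pattern.goA pattern ((0, c) :: PySem.List.enumerate r ((0 : Int) + 1)) = hWk r := by
          simp [validate_pattern.goA, hc, zero_add, hA, go2_eq_h]
        rw [hgo, hms]
        simp only [List.head?_cons, Option.getD_some, List.drop_succ_cons, List.drop_zero]
        cases hw : hWk r
        · simp [hmem'.mpr hw]
        · have h2 : [] ∉ qs.dropLast := by
            intro h
            rw [hmem'.mp h] at hw
            exact absurd hw (by simp)
          simp [h2]
    · -- no star: both sides are trivially true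
      have hc : c ≠ '*' := fun h => hstar (by simp [h])
      have h0 : pattern.toList[0]? = some c := by rw [hs]; rfl
      have hd : pattern.toList.drop 1 = r := by rw [hs]; rfl
      have hA := goA_eq pattern r 1 c (by omega) hd (by simpa using h0)
      simp only [Nat.cast_one] at hA
      have hg : go2 c r = true := by
        rw [go2_eq_h, if_neg hc]; exact hWk_no_star r (fun h => hstar (by simp [h]))
      rw [msplit_no_star (c :: r) [] hstar]
      simp [validate_pattern.goA, hc, zero_add, hA, hg]
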